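-- pv_equiv track=rewrite | github.com/ksomemo/Competitive-programming | atcoder/arc/041/p_c.py | count_jump
-- ===== SOURCE A (Python) =====
-- def count_jump(right_list, left_list, L):
--     jump_count = 0
--     if len(right_list) == 0:
--         for i, p in enumerate(left_list):
--             jump_count += p - i - 1
--     elif len(left_list) == 0:
--         for i, p in enumerate(right_list):
--             jump_count += L - p - i
--     else:
--         # 各向きのグループの間隔を詰める
--         for i, p in enumerate(right_list):
--             jump_count += right_list[-1] - p - i
--         for i, p in enumerate(left_list):
--             jump_count += p - left_list[0] - i
--
--         # グループ先頭同士の間を片方のグループを進めて詰める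
--         head_diff = left_list[0] - right_list[-1] - 1
--         max_cnt = max(len(right_list), len(left_list))
--         jump_count += head_diff * max_cnt
--
--     return jump_count
-- ===== SOURCE B (Python) =====
-- def count_jump(right_list, left_list, L):
--     # closed-form arithmetic instead of the accumulation loops
--     def tri(n):
--         return n * (n - 1) // 2
--     nr, nl = len(right_list), len(left_list)
--     if nr == 0:
--         return sum(left_list) - tri(nl) - nl
--     if nl == 0:
--         return L * nr - sum(right_list) - tri(nr)
--     last, first = right_list[-1], left_list[0]
--     right_part = last * nr - sum(right_list) - tri(nr)
--     left_part = sum(left_list) - first * nl - tri(nl)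
--     return right_part + left_part + (first - last - 1) * max(nr, nl)
-- ===== Notes on version B (the rewrite author's own statement) =====
-- stated objective: simpler
-- what changed: Replaced every enumerate-accumulation loop by a closed-form arithmetic expression (list sum minus a triangular number and a constant-offset term), keeping only the three-branch case split.
import Mathlib
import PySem

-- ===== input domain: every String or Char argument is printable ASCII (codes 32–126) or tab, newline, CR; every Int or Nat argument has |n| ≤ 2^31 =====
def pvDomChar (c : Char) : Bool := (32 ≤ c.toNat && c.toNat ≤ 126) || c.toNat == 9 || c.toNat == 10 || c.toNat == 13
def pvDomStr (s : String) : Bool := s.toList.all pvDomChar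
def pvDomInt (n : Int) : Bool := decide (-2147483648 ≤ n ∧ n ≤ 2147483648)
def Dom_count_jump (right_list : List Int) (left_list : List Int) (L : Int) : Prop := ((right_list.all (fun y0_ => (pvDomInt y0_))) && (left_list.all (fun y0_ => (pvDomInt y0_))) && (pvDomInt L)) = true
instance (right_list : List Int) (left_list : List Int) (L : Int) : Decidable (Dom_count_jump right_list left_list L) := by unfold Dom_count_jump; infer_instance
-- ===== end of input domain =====

-- B replaces each enumerate-accumulation loop of A by a closed-form arithmetic expression (list sum minus a triangular number); same three-branch structure, same cost.


-- ===== PORT A =====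
def count_jump (right_list : List Int) (left_list : List Int) (L : Int) : Int :=
  if right_list.length = 0 then
    (PySem.List.enumerate left_list).foldl (fun jc ip => jc + (ip.2 - ip.1 - 1)) 0
  else if left_list.length = 0 then
    (PySem.List.enumerate right_list).foldl (fun jc ip => jc + (L - ip.2 - ip.1)) 0
  else
    -- right_list[-1] / left_list[0]: lists are nonempty in this branch, so getD 0 is never used
    let last := (PySem.List.pyGet? right_list (-1)).getD 0
    let first := (PySem.List.pyGet? left_list 0).getD 0
    let jc1 := (PySem.List.enumerate right_list).foldl (fun jc ip => jc + (last - ip.2 - ip.1)) 0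
    let jc2 := (PySem.List.enumerate left_list).foldl (fun jc ip => jc + (ip.2 - first - ip.1)) jc1
    let head_diff := first - last - 1
    let max_cnt : Int := ((max right_list.length left_list.length : Nat) : Int)
    jc2 + head_diff * max_cnt

-- ===== PORT B =====
-- n * (n - 1) // 2
def pvTri (n : Int) : Int := PySem.Int.floordiv (n * (n - 1)) 2

def count_jump_alt (right_list : List Int) (left_list : List Int) (L : Int) : Int :=
  let nr : Int := right_list.length
  let nl : Int := left_list.length
  if nr = 0 then
    left_list.sum - pvTri nl - nl
  else if nl = 0 then
    L * nr - right_list.sum - pvTri nr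
  else
    let last := (PySem.List.pyGet? right_list (-1)).getD 0
    let first := (PySem.List.pyGet? left_list 0).getD 0
    let right_part := last * nr - right_list.sum - pvTri nr
    let left_part := left_list.sum - first * nl - pvTri nl
    right_part + left_part + (first - last - 1) * max nr nl

-- ===== PRECONDITION & SPEC =====
def Spec_count_jump (right_list : List Int) (left_list : List Int) (L : Int) (out : Int) : Prop := out = count_jump_alt right_list left_list L
instance (right_list : List Int) (left_list : List Int) (L : Int) (out : Int) : Decidable (Spec_count_jump right_list left_list L out) := by unfold Spec_count_jump; infer_instance

-- ===== CLAIM (what is proved, stated in full; the proofs are below) =====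
def Claim_equal_count_jump : Prop := ∀ (right_list : List Int) (left_list : List Int) (L : Int), Dom_count_jump right_list left_list L → Spec_count_jump right_list left_list L (count_jump right_list left_list L)

-- ===== LEMMAS AND PROOFS =====
-- triangular numbers, recursively
def pvTriAux : Nat → Int
  | 0 => 0
  | n + 1 => pvTriAux n + n

theorem pvTriAux_double (n : Nat) : 2 * pvTriAux n = (n : Int) * ((n : Int) - 1) := by
  induction n with
  | zero => simp [pvTriAux]
  | succ m ih =>
    simp only [pvTriAux]
    push_cast
    linear_combination ih

theorem pvTri_natCast (n : Nat) : pvTri (n : Int) = pvTriAux n := by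
  unfold pvTri
  rw [PySem.Int.floordiv_eq_ediv_of_pos (by norm_num)]
  have h : (n : Int) * ((n : Int) - 1) = 2 * pvTriAux n := (pvTriAux_double n).symm
  rw [h, Int.mul_ediv_cancel_left _ (by norm_num)]

theorem pvEnumFold (a b : Int) (l : List Int) : ∀ (s : Int) (acc : Int),
    (PySem.List.enumerate l s).foldl (fun jc ip => jc + (a * ip.2 + b - ip.1)) acc
      = acc + a * l.sum + b * l.length - ((l.length : Int) * s + pvTriAux l.length) := by
  induction l with
  | nil => intro s acc; simp [PySem.List.enumerate, pvTriAux]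
  | cons x xs ih =>
    intro s acc
    rw [PySem.List.enumerate_cons, List.foldl_cons, ih]
    simp only [List.sum_cons, List.length_cons, pvTriAux]
    push_cast
    ring

theorem pvFoldShape1 (l : List Int) (s acc : Int) :
    (PySem.List.enumerate l s).foldl (fun jc ip => jc + (ip.2 - ip.1 - 1)) acc
      = acc + 1 * l.sum + (-1) * l.length - ((l.length : Int) * s + pvTriAux l.length) := by
  have hf : (fun (jc : Int) (ip : Int × Int) => jc + (ip.2 - ip.1 - 1))
      = (fun jc ip => jc + (1 * ip.2 + (-1) - ip.1)) := by funext jc ip; ring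
  rw [hf, pvEnumFold]

theorem pvFoldShape2 (c : Int) (l : List Int) (s acc : Int) :
    (PySem.List.enumerate l s).foldl (fun jc ip => jc + (c - ip.2 - ip.1)) acc
      = acc + (-1) * l.sum + c * l.length - ((l.length : Int) * s + pvTriAux l.length) := by
  have hf : (fun (jc : Int) (ip : Int × Int) => jc + (c - ip.2 - ip.1))
      = (fun jc ip => jc + ((-1) * ip.2 + c - ip.1)) := by funext jc ip; ring
  rw [hf, pvEnumFold]

theorem pvFoldShape3 (c : Int) (l : List Int) (s acc : Int) :
    (PySem.List.enumerate l s).foldl (fun jc ip => jc + (ip.2 - c - ip.1)) acc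
      = acc + 1 * l.sum + (-c) * l.length - ((l.length : Int) * s + pvTriAux l.length) := by
  have hf : (fun (jc : Int) (ip : Int × Int) => jc + (ip.2 - c - ip.1))
      = (fun jc ip => jc + (1 * ip.2 + (-c) - ip.1)) := by funext jc ip; ring
  rw [hf, pvEnumFold]

-- ===== VERDICT (by name: the statement is the Claim_ definition above) =====
theorem count_jump_spec : Claim_equal_count_jump := by
  intro right_list left_list L _
  unfold Spec_count_jump count_jump count_jump_alt
  split_ifs with h1 h2
  · have h1' : ((right_list.length : Int)) = 0 := by exact_mod_cast h1
    rw [pvFoldShape1]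
    simp only [h1', if_true]
    rw [pvTri_natCast]; ring
  · have h1' : ((right_list.length : Int)) ≠ 0 := by exact_mod_cast h1
    have h2' : ((left_list.length : Int)) = 0 := by exact_mod_cast h2
    rw [pvFoldShape2]
    simp only [h2', if_true, if_neg h1']
    rw [pvTri_natCast]; ring
  · have h1' : ((right_list.length : Int)) ≠ 0 := by exact_mod_cast h1
    have h2' : ((left_list.length : Int)) ≠ 0 := by exact_mod_cast h2
    simp only [pvFoldShape3, pvFoldShape2, if_neg h1', if_neg h2']
    rw [pvTri_natCast, pvTri_natCast]
    push_cast
    ring
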